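-- pv_equiv track=rewrite | github.com/Rali0s/Deep-Nim-Sec | Data-Sets/Data-Parser/Archive/unified_dataset.py | ensure_min_rows
-- ===== SOURCE A (Python) =====
-- from typing import Iterable, List, Optional, Tuple, Dict
--
-- def ensure_min_rows(records: List[Tuple[str, str]], min_rows: int) -> List[Tuple[str, str]]:
--     if len(records) >= min_rows:
--         return records
--     if not records:
--         return records
--     # Deterministic oversampling: repeat from start until we reach min_rows
--     out = list(records)
--     idx = 0
--     while len(out) < min_rows:
--         out.append(records[idx % len(records)])
--         idx += 1
--     return out
-- ===== SOURCE B (Python) =====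
-- def ensure_min_rows(records, min_rows):
--     if len(records) >= min_rows:
--         return records
--     if not records:
--         return records
--     # closed-form: ceiling-divide to get the repeat count, replicate and cut
--     k = -(-min_rows // len(records))
--     return (records * k)[:min_rows]
-- ===== Notes on version B (the rewrite author's own statement) =====
-- stated objective: simpler
-- what changed: Replaces the modular-index append loop with closed-form replication: repeat count by ceiling division, then list multiplication and a slice.
import Mathlib
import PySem

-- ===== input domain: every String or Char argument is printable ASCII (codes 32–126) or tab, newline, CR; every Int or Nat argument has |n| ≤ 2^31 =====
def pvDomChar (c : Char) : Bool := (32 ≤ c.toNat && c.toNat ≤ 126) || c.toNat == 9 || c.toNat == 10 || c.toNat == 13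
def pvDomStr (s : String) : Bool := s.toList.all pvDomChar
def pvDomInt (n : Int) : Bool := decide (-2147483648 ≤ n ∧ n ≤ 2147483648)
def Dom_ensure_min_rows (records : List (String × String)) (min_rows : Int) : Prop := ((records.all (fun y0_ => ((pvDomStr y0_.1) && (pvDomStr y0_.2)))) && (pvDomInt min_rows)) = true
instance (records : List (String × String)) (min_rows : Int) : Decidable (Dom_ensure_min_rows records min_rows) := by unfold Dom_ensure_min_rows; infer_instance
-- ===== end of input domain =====

-- B replaces A's modular-index append loop with a closed-form replicate-and-slice (simpler); return value equivalence only.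

-- ===== PORT A =====
-- the while loop: append records[idx % len(records)] while len(out) < min_rows
def pvEnsureLoop (records : List (String × String)) (min_rows : Int)
    (fuel : Nat) (out : List (String × String)) (idx : Int) : List (String × String) :=
  match fuel with
  | 0 => out
  | t + 1 =>
    if (out.length : Int) < min_rows then
      pvEnsureLoop records min_rows t
        (out ++ [PySem.List.pyGetD records (PySem.Int.mod idx (records.length : Int)) ("", "")])
        (idx + 1)
    else out

def ensure_min_rows (records : List (String × String)) (min_rows : Int) : List (String × String) :=
  if (records.length : Int) ≥ min_rows then records
  else if records = [] then records
  else pvEnsureLoop records min_rows (min_rows - records.length).toNat records 0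

-- ===== PORT B =====
def ensure_min_rows_alt (records : List (String × String)) (min_rows : Int) : List (String × String) :=
  if (records.length : Int) ≥ min_rows then records
  else if records = [] then records
  else
    let k : Int := -(PySem.Int.floordiv (-min_rows) (records.length : Int))
    PySem.List.slice (List.flatten (List.replicate k.toNat records)) none (some min_rows)

-- ===== PRECONDITION & SPEC =====
def Spec_ensure_min_rows (records : List (String × String)) (min_rows : Int) (out : List (String × String)) : Prop := out = ensure_min_rows_alt records min_rows
instance (records : List (String × String)) (min_rows : Int) (out : List (String × String)) : Decidable (Spec_ensure_min_rows records min_rows out) := by unfold Spec_ensure_min_rows; infer_instance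

-- ===== CLAIM (what is proved, stated in full; the proofs are below) =====
def Claim_equal_ensure_min_rows : Prop := ∀ (records : List (String × String)) (min_rows : Int), Dom_ensure_min_rows records min_rows → Spec_ensure_min_rows records min_rows (ensure_min_rows records min_rows)

-- ===== LEMMAS AND PROOFS =====

-- a prefix of a list, written as getD over an index range
theorem pv_take_eq_map_range (xs : List (String × String)) (t : Nat) (h : t ≤ xs.length) :
    xs.take t = (List.range t).map (fun j => xs.getD j ("", "")) := by
  apply List.ext_getElem
  · simp [Nat.min_eq_left h]
  · intro i h1 h2
    simp at h1 h2
    simp [List.getElem_take, List.getD_eq_getElem?_getD, List.getElem?_eq_getElem (by omega : i < xs.length)]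

-- a nonempty list is its own first cycle of getD (j % length)
theorem pv_self_eq_map_range (xs : List (String × String)) :
    (List.range xs.length).map (fun j => xs.getD (j % xs.length) ("", "")) = xs := by
  have h1 : (List.range xs.length).map (fun j => xs.getD (j % xs.length) ("", ""))
      = (List.range xs.length).map (fun j => xs.getD j ("", "")) := by
    apply List.map_congr_left
    intro j hj
    simp at hj
    rw [Nat.mod_eq_of_lt hj]
  rw [h1, ← pv_take_eq_map_range xs xs.length le_rfl, List.take_of_length_le le_rfl]

-- the first t elements of K concatenated copies of xs are the cyclic elements xs[j % n]
theorem pv_take_flatten_replicate (xs : List (String × String)) (K t : Nat)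
    (hn : xs ≠ []) (h : t ≤ K * xs.length) :
    (List.flatten (List.replicate K xs)).take t
      = (List.range t).map (fun j => xs.getD (j % xs.length) ("", "")) := by
  induction K generalizing t with
  | zero =>
    have ht0 : t = 0 := by simpa using h
    subst ht0; simp
  | succ K ih =>
    have hnpos : 0 < xs.length := List.length_pos_iff.mpr hn
    rw [List.replicate_succ, List.flatten_cons, List.take_append]
    by_cases ht : t ≤ xs.length
    · have h0 : t - xs.length = 0 := by omega
      rw [h0]
      simp only [List.take_zero, List.append_nil]
      rw [pv_take_eq_map_range xs t ht]
      apply List.map_congr_left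
      intro j hj
      simp at hj
      rw [Nat.mod_eq_of_lt (by omega)]
    · have h2 : t - xs.length ≤ K * xs.length := by
        have hx : (K + 1) * xs.length = K * xs.length + xs.length := by ring
        omega
      rw [ih (t - xs.length) h2, List.take_of_length_le (by omega)]
      have hr : List.range t
          = List.range xs.length ++ (List.range (t - xs.length)).map (fun j => xs.length + j) := by
        rw [← List.range_add]
        congr 1
        omega
      rw [hr, List.map_append]
      congr 1
      · exact (pv_self_eq_map_range xs).symm
      · rw [List.map_map]
        apply List.map_congr_left
        intro j hj
        simp [Nat.add_mod_left]

-- the loop appends exactly the cyclic elements records[(idx+j) % n], j < fuel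
theorem pv_loop_eq (records : List (String × String)) (min_rows : Int)
    (hn : records ≠ []) :
    ∀ (t : Nat) (out : List (String × String)) (idx : Int), 0 ≤ idx →
      (min_rows - out.length).toNat = t →
      pvEnsureLoop records min_rows t out idx
        = out ++ (List.range t).map
            (fun j => records.getD ((idx.toNat + j) % records.length) ("", "")) := by
  have hnpos : 0 < records.length := List.length_pos_iff.mpr hn
  intro t
  induction t with
  | zero =>
    intro out idx hidx h0
    simp [pvEnsureLoop]
  | succ t ih =>
    intro out idx hidx ht
    have hlt : (out.length : Int) < min_rows := by omega
    simp only [pvEnsureLoop, hlt, if_pos]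
    rw [ih (out ++ [PySem.List.pyGetD records (PySem.Int.mod idx (records.length : Int)) ("", "")])
        (idx + 1) (by omega)
        (by simp only [List.length_append, List.length_cons, List.length_nil]; omega)]
    rw [List.append_assoc]
    congr 1
    have hmod : PySem.Int.mod idx (records.length : Int) = ((idx.toNat % records.length : Nat) : Int) := by
      rw [PySem.Int.mod_eq_emod_of_pos (by exact_mod_cast hnpos)]
      push_cast
      rw [Int.toNat_of_nonneg hidx]
    rw [hmod, PySem.List.pyGetD_natCast]
    rw [List.range_succ_eq_map, List.map_cons]
    simp only [Nat.add_zero, List.map_map, List.cons_append, List.nil_append]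
    congr 1
    · apply List.map_congr_left
      intro j hj
      simp only [Function.comp_apply, Nat.succ_eq_add_one]
      congr 2
      omega

-- ===== VERDICT (by name: the statement is the Claim_ definition above) =====
theorem ensure_min_rows_spec : Claim_equal_ensure_min_rows := by
  intro records min_rows _hdom
  unfold Spec_ensure_min_rows ensure_min_rows ensure_min_rows_alt
  by_cases hge : (records.length : Int) ≥ min_rows
  · simp [hge]
  · simp only [hge, if_false]
    by_cases hnil : records = []
    · simp [hnil]
    · simp only [hnil, if_false]
      have hnpos : 0 < records.length := List.length_pos_iff.mpr hnil
      have hnposI : (0 : Int) < (records.length : Int) := by exact_mod_cast hnpos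
      set n : Int := (records.length : Int) with hn
      set k : Int := -(PySem.Int.floordiv (-min_rows) n) with hk
      have hkspec := (PySem.Int.neg_floordiv_neg_eq_iff_of_pos (a := min_rows) (b := n) (q := k) hnposI).mp rfl
      have hk1 : 1 ≤ k := by nlinarith [hkspec.1, hkspec.2]
      have hmk : min_rows ≤ k * n := hkspec.2
      have hmnat : min_rows.toNat ≤ k.toNat * records.length := by
        have h : (min_rows.toNat : Int) ≤ (k.toNat : Int) * (records.length : Int) := by
          rw [Int.toNat_of_nonneg (by omega), Int.toNat_of_nonneg (by omega)]
          exact hmk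
        exact_mod_cast h
      rw [PySem.List.slice_to _ (by omega)]
      rw [pv_take_flatten_replicate records k.toNat min_rows.toNat hnil hmnat]
      rw [pv_loop_eq records min_rows hnil (min_rows - records.length).toNat records 0 le_rfl rfl]
      have hsplit : min_rows.toNat = records.length + (min_rows - (records.length : Int)).toNat := by omega
      rw [hsplit, List.range_add, List.map_append]
      congr 1
      · exact (pv_self_eq_map_range records).symm
      · rw [List.map_map]
        apply List.map_congr_left
        intro j hj
        simp [Nat.add_mod_left]
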